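-- pv_equiv track=rewrite | github.com/zvpyp/lenguaje_pro | analizador_lexico.py | es_real
-- ===== SOURCE A (Python) =====
-- def tipo_caracter(caracter):
--     if caracter.isalpha():
--         return "letra"
--     elif caracter.isdigit():
--         return "digito"
--     elif caracter == "\"":
--         return "comilla"
--     elif caracter == ".":
--         return "punto"
--     else:
--         return "otro"
--
-- def es_real(cadena):
--     estados = [
--         {
--             "letra": 5,
--             "digito": 1,
--             "comilla": 5,
--             "punto": 5,
--             "otro": 5,
--         },
--         {
--             "letra": 5,
--             "digito": 1,
--             "comilla": 5,
--             "punto": 2,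
--             "otro": 4,
--         },
--         {
--             "letra": 5,
--             "digito": 3,
--             "comilla": 5,
--             "punto": 5,
--             "otro": 5,
--         },
--         {
--             "letra": 5,
--             "digito": 3,
--             "comilla": 5,
--             "punto": 5,
--             "otro": 4,
--         }
--     ]
--
--     posicion_actual = 0
--     caracter_actual = ''
--
--     estado_actual = 0
--
--     try:
--         while estado_actual not in (4,5):
--             caracter_actual = cadena[posicion_actual]
--             estado_actual = estados[estado_actual].get(tipo_caracter(caracter_actual))
--             posicion_actual += 1
--     except:
--         pass
--
--     if estado_actual == 4:
--         return (True, posicion_actual - 1)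
--     else:
--         return (False, 0)
-- ===== SOURCE B (Python) =====
-- def es_real(cadena):
--     # Phased scanner: digits, optional '.' + digits, then an "otro" terminator.
--     n = len(cadena)
--     i = 0
--     while i < n and cadena[i].isdigit():
--         i += 1
--     if i == 0:
--         return (False, 0)
--     if i < n and cadena[i] == '.':
--         j = i + 1
--         while j < n and cadena[j].isdigit():
--             j += 1
--         if j == i + 1:
--             return (False, 0)
--         i = j
--     if i < n:
--         c = cadena[i]
--         if not (c.isalpha() or c.isdigit() or c == '"' or c == '.'):
--             return (True, i)
--     return (False, 0)
-- ===== Notes on version B (the rewrite author's own statement) =====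
-- stated objective: simpler
-- what changed: Replaced the dict-of-dicts DFA transition table and single state-machine loop with a direct phased scanner: consume digits, optionally a decimal point plus digits, then accept iff a terminator character (neither letter, digit, quote nor dot) follows.
import Mathlib
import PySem

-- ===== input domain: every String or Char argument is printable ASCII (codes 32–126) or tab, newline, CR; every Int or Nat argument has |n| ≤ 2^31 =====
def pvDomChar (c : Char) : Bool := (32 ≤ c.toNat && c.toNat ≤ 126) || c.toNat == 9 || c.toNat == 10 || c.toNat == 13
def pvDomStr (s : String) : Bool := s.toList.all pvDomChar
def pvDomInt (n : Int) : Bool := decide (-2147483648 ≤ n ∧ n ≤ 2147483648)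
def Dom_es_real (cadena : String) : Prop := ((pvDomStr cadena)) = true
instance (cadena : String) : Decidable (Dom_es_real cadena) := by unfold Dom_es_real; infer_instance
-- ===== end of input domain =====

-- B replaces A's dict-of-dicts DFA table and state loop by a direct phased scanner
-- (digits, an optional decimal point plus digits, one terminator); objective: simpler.

-- ===== PORT A =====
def tipoCaracter (c : Char) : String :=
  if PySem.Chars.isalpha c then "letra"
  else if PySem.Chars.isdigit c then "digito"
  else if c = '"' then "comilla"
  else if c = '.' then "punto"
  else "otro"

def esRealEstados : List (PySem.Dict String Int) :=
  [ PySem.Dict.mk [("letra", 5), ("digito", 1), ("comilla", 5), ("punto", 5), ("otro", 5)],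
    PySem.Dict.mk [("letra", 5), ("digito", 1), ("comilla", 5), ("punto", 2), ("otro", 4)],
    PySem.Dict.mk [("letra", 5), ("digito", 3), ("comilla", 5), ("punto", 5), ("otro", 5)],
    PySem.Dict.mk [("letra", 5), ("digito", 3), ("comilla", 5), ("punto", 5), ("otro", 4)] ]

-- estados[estado_actual].get(tipo_caracter(caracter_actual)) of A
def transA (estado : Int) (cat : String) : Option Int :=
  (PySem.List.pyGet? esRealEstados estado).bind (fun d => PySem.Dict.get? d cat)

-- A's while loop; the fuel only makes the recursion structural (its exits mirror A's:
-- state in (4,5), or the IndexError swallowed by `except: pass`)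
def esRealGo (cs : List Char) : Nat → Int → Int → Int × Int
  | 0, pos, estado => (estado, pos)
  | f + 1, pos, estado =>
    if estado = 4 ∨ estado = 5 then (estado, pos)
    else
      match PySem.List.pyGet? cs pos with
      | none => (estado, pos)   -- IndexError, caught by `except: pass`
      | some c =>
        match transA estado (tipoCaracter c) with
        | none => (estado, pos) -- unreachable: the table covers every category for states 0..3
        | some s => esRealGo cs f (pos + 1) s

def es_real (cadena : String) : Bool × Int :=
  let r := esRealGo cadena.toList (cadena.toList.length + 1) 0 0
  if r.1 = 4 then (true, r.2 - 1) else (false, 0)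

-- ===== PORT B =====
def isOtro (c : Char) : Bool :=
  !(PySem.Chars.isalpha c || PySem.Chars.isdigit c || c = '"' || c = '.')

-- the `while i < n and cadena[i].isdigit(): i += 1` scans of Source B, as a count
def digitsLen : List Char → Nat
  | [] => 0
  | c :: r => if PySem.Chars.isdigit c then digitsLen r + 1 else 0

def es_real_alt (cadena : String) : Bool × Int :=
  let cs := cadena.toList
  let i := digitsLen cs
  if i = 0 then (false, 0)
  else
    match cs.drop i with
    | [] => (false, 0)
    | c :: r2 =>
      if c = '.' then
        let j := digitsLen r2
        if j = 0 then (false, 0)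
        else
          match r2.drop j with
          | [] => (false, 0)
          | c2 :: _ => if isOtro c2 then (true, ((i + 1 + j : Nat) : Int)) else (false, 0)
      else if isOtro c then (true, (i : Int)) else (false, 0)

-- ===== PRECONDITION & SPEC =====
def Spec_es_real (cadena : String) (out : Bool × Int) : Prop := out = es_real_alt cadena
instance (cadena : String) (out : Bool × Int) : Decidable (Spec_es_real cadena out) := by unfold Spec_es_real; infer_instance

-- ===== CLAIM (what is proved, stated in full; the proofs are below) =====
def Claim_equal_es_real : Prop := ∀ (cadena : String), Dom_es_real cadena → Spec_es_real cadena (es_real cadena)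

-- ===== LEMMAS AND PROOFS =====

-- what A's loop computes from state 3 (resp. state 1) on the remaining suffix
def phase3 (rest : List Char) (pos : Int) : Int × Int :=
  let e := digitsLen rest
  match rest.drop e with
  | [] => (3, pos + e)
  | c :: _ => if isOtro c then (4, pos + e + 1) else (5, pos + e + 1)

def phase1 (rest : List Char) (pos : Int) : Int × Int :=
  let d := digitsLen rest
  match rest.drop d with
  | [] => (1, pos + d)
  | c :: r2 =>
    if c = '.' then
      match r2 with
      | [] => (2, pos + d + 1)
      | c2 :: r3 =>
        if PySem.Chars.isdigit c2 then phase3 (c2 :: r3) (pos + d + 1)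
        else (5, pos + d + 2)
    else if isOtro c then (4, pos + d + 1) else (5, pos + d + 1)

lemma pyGet?_of_drop {cs rest : List Char} {p : Nat} (h : cs.drop p = rest) :
    PySem.List.pyGet? cs (p : Int) = rest.head? := by
  simp [PySem.List.pyGet?_natCast, ← h, List.head?_drop]

lemma drop_succ_of_drop {cs rest : List Char} {c : Char} {p : Nat}
    (h : cs.drop p = c :: rest) : cs.drop (p + 1) = rest := by
  rw [List.drop_add_one_eq_tail_drop, h]; rfl

lemma isalpha_false_of_digit {c : Char} (h : PySem.Chars.isdigit c = true) :
    PySem.Chars.isalpha c = false := by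
  simp [PySem.Chars.isdigit] at h
  obtain ⟨h1, h2⟩ := h
  simp [Char.le_def, UInt32.le_iff_toNat_le] at h1 h2
  simp [PySem.Chars.isalpha, PySem.Chars.isupper, PySem.Chars.islower, Char.le_def,
    UInt32.le_iff_toNat_le]
  omega

lemma tipo_digit {c : Char} (h : PySem.Chars.isdigit c = true) :
    tipoCaracter c = "digito" := by
  simp [tipoCaracter, isalpha_false_of_digit h, h]

lemma trans0_nd {c : Char} (hd : PySem.Chars.isdigit c = false) :
    transA 0 (tipoCaracter c) = some 5 := by
  simp [tipoCaracter, hd]; split_ifs <;> decide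

lemma trans1_nd {c : Char} (hd : PySem.Chars.isdigit c = false) (hp : ¬ c = '.') :
    transA 1 (tipoCaracter c) = some (if isOtro c then 4 else 5) := by
  simp [tipoCaracter, isOtro, hd, hp]; split_ifs <;> simp_all <;> decide

lemma trans2_nd {c : Char} (hd : PySem.Chars.isdigit c = false) :
    transA 2 (tipoCaracter c) = some 5 := by
  simp [tipoCaracter, hd]; split_ifs <;> decide

lemma trans3_nd {c : Char} (hd : PySem.Chars.isdigit c = false) :
    transA 3 (tipoCaracter c) = some (if isOtro c then 4 else 5) := by
  simp [tipoCaracter, isOtro, hd]; split_ifs <;> simp_all <;> decide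

lemma go_step {cs : List Char} {f : Nat} {p st : Int} {c : Char} (s : Int)
    (hst : ¬(st = 4 ∨ st = 5)) (hc : PySem.List.pyGet? cs p = some c)
    (ht : transA st (tipoCaracter c) = some s) :
    esRealGo cs (f + 1) p st = esRealGo cs f (p + 1) s := by
  simp [esRealGo, hst, hc, ht]

lemma go_exhaust {cs : List Char} {f : Nat} {p st : Int}
    (hst : ¬(st = 4 ∨ st = 5)) (hc : PySem.List.pyGet? cs p = none) :
    esRealGo cs (f + 1) p st = (st, p) := by
  simp [esRealGo, hst, hc]

lemma go_done {cs : List Char} {f : Nat} {p st : Int} (hst : st = 4 ∨ st = 5) :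
    esRealGo cs f p st = (st, p) := by
  cases f <;> simp [esRealGo, hst]

lemma phase3_digit_shift {c : Char} (r : List Char) (pos : Int)
    (hd : PySem.Chars.isdigit c = true) :
    phase3 (c :: r) pos = phase3 r (pos + 1) := by
  rcases hcase : r.drop (digitsLen r) with _ | ⟨c2, r3⟩ <;>
    simp only [phase3, digitsLen, hd, if_true, List.drop_succ_cons, hcase] <;>
    (try split_ifs) <;> simp [Prod.ext_iff] <;> omega

lemma phase1_digit_shift {c : Char} (r : List Char) (pos : Int)
    (hd : PySem.Chars.isdigit c = true) :
    phase1 (c :: r) pos = phase1 r (pos + 1) := by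
  rcases hcase : r.drop (digitsLen r) with _ | ⟨c2, r2⟩
  · simp only [phase1, digitsLen, hd, if_true, List.drop_succ_cons, hcase]
    simp [Prod.ext_iff]; omega
  · by_cases hp : c2 = '.'
    · subst hp
      rcases r2 with _ | ⟨c3, r3⟩
      · simp only [phase1, digitsLen, hd, if_true, List.drop_succ_cons, hcase]
        simp [Prod.ext_iff]; omega
      · by_cases hd3 : PySem.Chars.isdigit c3 = true
        · simp only [phase1, digitsLen, hd, if_true, List.drop_succ_cons, hcase, hd3]
          congr 1; push_cast; ring
        · simp only [phase1, digitsLen, hd, if_true, List.drop_succ_cons, hcase, hd3]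
          simp [Prod.ext_iff]; omega
    · simp only [phase1, digitsLen, hd, if_true, List.drop_succ_cons, hcase]
      simp only [if_neg hp]
      split_ifs <;> simp [Prod.ext_iff] <;> omega

lemma loop3 (cs : List Char) : ∀ (rest : List Char) (p f : Nat),
    cs.drop p = rest → rest.length < f →
    esRealGo cs f (p : Int) 3 = phase3 rest (p : Int) := by
  intro rest
  induction rest with
  | nil =>
    intro p f h hf
    obtain ⟨f', rfl⟩ : ∃ f', f = f' + 1 := ⟨f - 1, by omega⟩
    rw [go_exhaust (by decide) (by rw [pyGet?_of_drop h]; rfl)]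
    simp [phase3, digitsLen]
  | cons c r ih =>
    intro p f h hf
    obtain ⟨f', rfl⟩ : ∃ f', f = f' + 1 := ⟨f - 1, by omega⟩
    have hc : PySem.List.pyGet? cs (p : Int) = some c := by rw [pyGet?_of_drop h]; rfl
    have hdrop : cs.drop (p + 1) = r := drop_succ_of_drop h
    have hcast : ((p : Int) + 1) = ((p + 1 : Nat) : Int) := by push_cast; ring
    simp only [List.length_cons] at hf
    by_cases hd : PySem.Chars.isdigit c = true
    · rw [go_step 3 (by decide) hc (by rw [tipo_digit hd]; decide)]
      rw [hcast, ih (p + 1) f' hdrop (by omega), ← hcast, phase3_digit_shift r _ hd]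
    · rw [go_step (if isOtro c then 4 else 5) (by decide) hc (trans3_nd (by simpa using hd))]
      rw [go_done (by split_ifs <;> simp)]
      simp only [phase3, digitsLen, hd, Bool.false_eq_true, if_false, List.drop_zero,
        Nat.cast_zero]
      split_ifs <;> simp

lemma loop1 (cs : List Char) : ∀ (rest : List Char) (p f : Nat),
    cs.drop p = rest → rest.length < f →
    esRealGo cs f (p : Int) 1 = phase1 rest (p : Int) := by
  intro rest
  induction rest with
  | nil =>
    intro p f h hf
    obtain ⟨f', rfl⟩ : ∃ f', f = f' + 1 := ⟨f - 1, by omega⟩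
    rw [go_exhaust (by decide) (by rw [pyGet?_of_drop h]; rfl)]
    simp [phase1, digitsLen]
  | cons c r ih =>
    intro p f h hf
    obtain ⟨f', rfl⟩ : ∃ f', f = f' + 1 := ⟨f - 1, by omega⟩
    have hc : PySem.List.pyGet? cs (p : Int) = some c := by rw [pyGet?_of_drop h]; rfl
    have hdrop : cs.drop (p + 1) = r := drop_succ_of_drop h
    have hcast : ((p : Int) + 1) = ((p + 1 : Nat) : Int) := by push_cast; ring
    simp only [List.length_cons] at hf
    by_cases hd : PySem.Chars.isdigit c = true
    · rw [go_step 1 (by decide) hc (by rw [tipo_digit hd]; decide)]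
      rw [hcast, ih (p + 1) f' hdrop (by omega), ← hcast, phase1_digit_shift r _ hd]
    · by_cases hp : c = '.'
      · subst hp
        rw [go_step 2 (by decide) hc (by decide)]
        obtain ⟨f'', rfl⟩ : ∃ f'', f' = f'' + 1 := ⟨f' - 1, by omega⟩
        rcases r with _ | ⟨c2, r3⟩
        · rw [hcast, go_exhaust (by decide) (by rw [pyGet?_of_drop hdrop]; rfl)]
          simp [phase1, digitsLen, show PySem.Chars.isdigit '.' = false from by decide]
        · have hc2 : PySem.List.pyGet? cs ((p : Int) + 1) = some c2 := by
            rw [hcast, pyGet?_of_drop hdrop]; rfl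
          have hdrop2 : cs.drop (p + 1 + 1) = r3 := drop_succ_of_drop hdrop
          have hcast2 : ((p : Int) + 1 + 1) = ((p + 1 + 1 : Nat) : Int) := by push_cast; ring
          simp only [List.length_cons] at hf
          by_cases hd2 : PySem.Chars.isdigit c2 = true
          · rw [go_step 3 (by decide) hc2 (by rw [tipo_digit hd2]; decide)]
            rw [hcast2, loop3 cs r3 (p + 1 + 1) f'' hdrop2 (by omega)]
            have h3 : phase3 r3 (((p + 1 + 1 : Nat) : Int)) = phase3 (c2 :: r3) ((p : Int) + 1) := by
              rw [phase3_digit_shift r3 _ hd2]; congr 1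
            rw [h3]
            simp only [phase1, digitsLen, hd, Bool.false_eq_true, if_false, List.drop_zero,
              Nat.cast_zero, hd2]
            congr 1
          · rw [go_step 5 (by decide) hc2 (trans2_nd (by simpa using hd2))]
            rw [go_done (by simp)]
            simp only [phase1, digitsLen, hd, Bool.false_eq_true, if_false, List.drop_zero,
              Nat.cast_zero, hd2]
            simp [Prod.ext_iff]; omega
      · rw [go_step (if isOtro c then 4 else 5) (by decide) hc (trans1_nd (by simpa using hd) hp)]
        rw [go_done (by split_ifs <;> simp)]
        simp only [phase1, digitsLen, hd, Bool.false_eq_true, if_false, List.drop_zero,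
          Nat.cast_zero, if_neg hp]
        split_ifs <;> simp

lemma es_real_eq (cadena : String) : es_real cadena = es_real_alt cadena := by
  unfold es_real es_real_alt
  rcases hcs : cadena.toList with _ | ⟨c, rest⟩
  · simp [esRealGo, PySem.List.pyGet?, digitsLen, PySem.List.pyIdx?]
  · simp only [List.length_cons]
    have hc0 : PySem.List.pyGet? (c :: rest) (0 : Int) = some c := by
      simp [PySem.List.pyGet?, PySem.List.pyIdx?]
    by_cases hd : PySem.Chars.isdigit c = true
    · rw [go_step 1 (by decide) hc0 (by rw [tipo_digit hd]; decide)]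
      have hl := loop1 (c :: rest) rest 1 (rest.length + 1) rfl (by omega)
      norm_num at hl
      rw [show ((0:Int) + 1) = 1 from by ring, hl]
      rcases hcase : rest.drop (digitsLen rest) with _ | ⟨c2, r2⟩
      · simp [phase1, digitsLen, hd, hcase]
      · by_cases hp : c2 = '.'
        · subst hp
          rcases r2 with _ | ⟨c3, r3⟩
          · simp [phase1, digitsLen, hd, hcase]
          · by_cases hd3 : PySem.Chars.isdigit c3 = true
            · rcases hcase2 : r3.drop (digitsLen r3) with _ | ⟨c4, r4⟩ <;>
                simp [phase1, phase3, digitsLen, hd, hd3, hcase, hcase2] <;>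
                split_ifs <;> simp [Prod.ext_iff] <;> omega
            · simp [phase1, digitsLen, hd, hd3, hcase]
        · simp only [phase1, digitsLen, hd, hcase, if_neg hp]
          split_ifs <;> simp_all [Prod.ext_iff] <;> omega
    · rw [go_step 5 (by decide) hc0 (trans0_nd (by simpa using hd))]
      rw [go_done (by simp)]
      simp [digitsLen, hd]

-- ===== VERDICT (by name: the statement is the Claim_ definition above) =====
theorem es_real_spec : Claim_equal_es_real := fun cadena _ => es_real_eq cadena
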